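-- pv_equiv track=rewrite | github.com/moyogo/glyphs2ufo | Lib/glyphsLib/builder/ufo.py | build_stylemap_names
-- ===== SOURCE A (Python) =====
-- from collections import deque
--
-- def _get_linked_style(style_name, is_bold, is_italic):
--     # strip last occurrence of 'Regular', 'Bold', 'Italic' from style_name
--     # depending on the values of is_bold and is_italic
--     linked_style = deque()
--     is_regular = not (is_bold or is_italic)
--     for part in reversed(style_name.split()):
--         if part == 'Regular' and is_regular:
--             is_regular = False
--         elif part == 'Bold' and is_bold:
--             is_bold = False
--         elif part == 'Italic' and is_italic:
--             is_italic = False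
--         else:
--             linked_style.appendleft(part)
--     return ' '.join(linked_style)
--
-- def build_stylemap_names(family_name, style_name, is_bold=False,
--                          is_italic=False, linked_style=None):
--     """Build UFO `styleMapFamilyName` and `styleMapStyleName` based on the
--     family and style names, and the entries in the "Style Linking" section
--     of the "Instances" tab in the "Font Info".
--
--     The value of `styleMapStyleName` can be either "regular", "bold", "italic"
--     or "bold italic", depending on the values of `is_bold` and `is_italic`.
--
--     The `styleMapFamilyName` is a combination of the `family_name` and the
--     `linked_style`.
--
--     If `linked_style` is unset or set to 'Regular', the linked style is equal
--     to the style_name with the last occurrences of the strings 'Regular',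
--     'Bold' and 'Italic' stripped from it.
--     """
--
--     styleMapStyleName = ' '.join(s for s in (
--         'bold' if is_bold else '',
--         'italic' if is_italic else '') if s) or 'regular'
--     if not linked_style or linked_style == 'Regular':
--         linked_style = _get_linked_style(style_name, is_bold, is_italic)
--     if linked_style:
--         styleMapFamilyName = family_name + ' ' + linked_style
--     else:
--         styleMapFamilyName = family_name
--     return styleMapFamilyName, styleMapStyleName
-- ===== SOURCE B (Python) =====
-- def _linked_style(style_name, is_bold, is_italic):
--     # Per-target removal: for each active word, delete only its last occurrence.
--     words = style_name.split()
--     for word, active in (('Regular', not (is_bold or is_italic)),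
--                          ('Bold', is_bold), ('Italic', is_italic)):
--         if active:
--             for k in range(len(words) - 1, -1, -1):
--                 if words[k] == word:
--                     del words[k]
--                     break
--     return ' '.join(words)
--
--
-- def build_stylemap_names(family_name, style_name, is_bold=False,
--                          is_italic=False, linked_style=None):
--     styleMapStyleName = {(False, False): 'regular',
--                          (True, False): 'bold',
--                          (False, True): 'italic',
--                          (True, True): 'bold italic'}[(bool(is_bold), bool(is_italic))]
--     if not linked_style or linked_style == 'Regular':
--         linked_style = _linked_style(style_name, is_bold, is_italic)
--     if linked_style:
--         return family_name + ' ' + linked_style, styleMapStyleName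
--     return family_name, styleMapStyleName
-- ===== Notes on version B (the rewrite author's own statement) =====
-- stated objective: alternative
-- what changed: Replaces A's single reversed deque pass that consumes three flags with per-target deletion of each active word's last occurrence, and a table lookup for styleMapStyleName instead of join-of-filtered-parts.
import Mathlib
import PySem

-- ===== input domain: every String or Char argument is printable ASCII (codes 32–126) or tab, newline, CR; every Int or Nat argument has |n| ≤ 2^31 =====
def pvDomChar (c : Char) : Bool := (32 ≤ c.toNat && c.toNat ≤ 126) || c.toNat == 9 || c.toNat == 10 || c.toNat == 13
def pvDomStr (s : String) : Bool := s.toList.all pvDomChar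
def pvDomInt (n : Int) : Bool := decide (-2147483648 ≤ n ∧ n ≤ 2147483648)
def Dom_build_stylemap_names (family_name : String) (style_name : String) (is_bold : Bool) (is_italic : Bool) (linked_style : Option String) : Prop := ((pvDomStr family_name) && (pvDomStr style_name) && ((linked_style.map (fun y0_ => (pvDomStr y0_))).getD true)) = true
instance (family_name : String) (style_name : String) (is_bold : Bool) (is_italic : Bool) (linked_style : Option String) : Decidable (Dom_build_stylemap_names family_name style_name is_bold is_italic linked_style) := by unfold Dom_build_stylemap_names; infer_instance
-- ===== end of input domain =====

-- B replaces A's single reversed flag-consuming deque pass with per-target last-occurrence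
-- deletion and a table lookup for the style name (objective: alternative decomposition).


-- ===== PORT A =====
-- loop over reversed(style_name.split()) with the three consuming flags; result in original order
def pvGetLinkedLoop : List String → Bool → Bool → Bool → List String
  | [], _, _, _ => []
  | p :: rest, r, b, i =>
    if p = "Regular" ∧ r then pvGetLinkedLoop rest false b i
    else if p = "Bold" ∧ b then pvGetLinkedLoop rest r false i
    else if p = "Italic" ∧ i then pvGetLinkedLoop rest r b false
    else pvGetLinkedLoop rest r b i ++ [p]

def pvGetLinkedStyle (style_name : String) (is_bold : Bool) (is_italic : Bool) : String :=
  PySem.Str.join " "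
    (pvGetLinkedLoop (PySem.Str.split₀ style_name).reverse (!(is_bold || is_italic)) is_bold is_italic)

def build_stylemap_names (family_name : String) (style_name : String) (is_bold : Bool) (is_italic : Bool) (linked_style : Option String) : String × String :=
  let j := PySem.Str.join " "
    (((if is_bold then "bold" else "") :: (if is_italic then "italic" else "") :: []).filter (· ≠ ""))
  let styleMapStyleName := if j = "" then "regular" else j
  let ls := match linked_style with
    | none => pvGetLinkedStyle style_name is_bold is_italic
    | some s => if s = "" ∨ s = "Regular" then pvGetLinkedStyle style_name is_bold is_italic else s
  if ls = "" then (family_name, styleMapStyleName)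
  else (family_name ++ " " ++ ls, styleMapStyleName)

-- ===== PORT B =====
-- delete the first occurrence of w scanning the reversed list (Source B's downward index loop with `del`/`break`)
def pvRemFirstRev (w : String) : List String → List String
  | [] => []
  | x :: t => if x = w then t else x :: pvRemFirstRev w t

def pvRemoveLast (w : String) (xs : List String) : List String :=
  (pvRemFirstRev w xs.reverse).reverse

def pvLinkedStyleAlt (style_name : String) (is_bold : Bool) (is_italic : Bool) : String :=
  let w0 := PySem.Str.split₀ style_name
  let w1 := if !(is_bold || is_italic) then pvRemoveLast "Regular" w0 else w0
  let w2 := if is_bold then pvRemoveLast "Bold" w1 else w1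
  let w3 := if is_italic then pvRemoveLast "Italic" w2 else w2
  PySem.Str.join " " w3

def build_stylemap_names_alt (family_name : String) (style_name : String) (is_bold : Bool) (is_italic : Bool) (linked_style : Option String) : String × String :=
  let styleMapStyleName :=
    match is_bold, is_italic with
    | false, false => "regular"
    | true,  false => "bold"
    | false, true  => "italic"
    | true,  true  => "bold italic"
  let ls := match linked_style with
    | none => pvLinkedStyleAlt style_name is_bold is_italic
    | some s => if s = "" ∨ s = "Regular" then pvLinkedStyleAlt style_name is_bold is_italic else s
  if ls = "" then (family_name, styleMapStyleName)
  else (family_name ++ " " ++ ls, styleMapStyleName)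

-- ===== PRECONDITION & SPEC =====
def Spec_build_stylemap_names (family_name : String) (style_name : String) (is_bold : Bool) (is_italic : Bool) (linked_style : Option String) (out : String × String) : Prop := out = build_stylemap_names_alt family_name style_name is_bold is_italic linked_style
instance (family_name : String) (style_name : String) (is_bold : Bool) (is_italic : Bool) (linked_style : Option String) (out : String × String) : Decidable (Spec_build_stylemap_names family_name style_name is_bold is_italic linked_style out) := by unfold Spec_build_stylemap_names; infer_instance

-- ===== CLAIM (what is proved, stated in full; the proofs are below) =====
def Claim_equal_build_stylemap_names : Prop := ∀ (family_name : String) (style_name : String) (is_bold : Bool) (is_italic : Bool) (linked_style : Option String), Dom_build_stylemap_names family_name style_name is_bold is_italic linked_style → Spec_build_stylemap_names family_name style_name is_bold is_italic linked_style (build_stylemap_names family_name style_name is_bold is_italic linked_style)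

-- ===== LEMMAS AND PROOFS =====
def pvChain (r b i : Bool) (ys : List String) : List String :=
  (if i then pvRemFirstRev "Italic" else id)
    ((if b then pvRemFirstRev "Bold" else id)
      ((if r then pvRemFirstRev "Regular" else id) ys))

lemma pvChain_cons (r b i : Bool) (x : String) (t : List String)
    (hr : ¬ (x = "Regular" ∧ r)) (hb : ¬ (x = "Bold" ∧ b)) (hi : ¬ (x = "Italic" ∧ i)) :
    pvChain r b i (x :: t) = x :: pvChain r b i t := by
  unfold pvChain
  cases r <;> cases b <;> cases i <;>
    simp_all [pvRemFirstRev] <;> simp_all [pvRemFirstRev]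

lemma pvLoop_eq_chain (ys : List String) : ∀ r b i : Bool,
    pvGetLinkedLoop ys r b i = (pvChain r b i ys).reverse := by
  induction ys with
  | nil => intro r b i; simp [pvGetLinkedLoop, pvChain]; cases r <;> cases b <;> cases i <;> simp [pvRemFirstRev]
  | cons x t ih =>
    intro r b i
    by_cases hr : x = "Regular" ∧ r
    · obtain ⟨hx, hrr⟩ := hr
      subst hx hrr
      rw [pvGetLinkedLoop, if_pos ⟨rfl, rfl⟩, ih]
      unfold pvChain
      simp [pvRemFirstRev]
    · by_cases hb : x = "Bold" ∧ b
      · obtain ⟨hx, hbb⟩ := hb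
        subst hx hbb
        rw [pvGetLinkedLoop, if_neg hr, if_pos ⟨rfl, rfl⟩, ih]
        unfold pvChain
        have hnr : ¬ ("Bold" : String) = "Regular" := by decide
        cases r <;> simp [pvRemFirstRev, hnr]
      · by_cases hi : x = "Italic" ∧ i
        · obtain ⟨hx, hii⟩ := hi
          subst hx hii
          rw [pvGetLinkedLoop, if_neg hr, if_neg hb, if_pos ⟨rfl, rfl⟩, ih]
          unfold pvChain
          have hnr : ¬ ("Italic" : String) = "Regular" := by decide
          have hnb : ¬ ("Italic" : String) = "Bold" := by decide
          cases r <;> cases b <;> simp [pvRemFirstRev, hnr, hnb]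
        · rw [pvGetLinkedLoop, if_neg hr, if_neg hb, if_neg hi, ih,
            pvChain_cons r b i x t hr hb hi]
          simp

lemma pvLinked_eq (style_name : String) (is_bold is_italic : Bool) :
    pvGetLinkedStyle style_name is_bold is_italic = pvLinkedStyleAlt style_name is_bold is_italic := by
  unfold pvGetLinkedStyle pvLinkedStyleAlt
  rw [pvLoop_eq_chain]
  congr 1
  unfold pvChain pvRemoveLast
  cases is_bold <;> cases is_italic <;> simp

-- ===== VERDICT (by name: the statement is the Claim_ definition above) =====
theorem build_stylemap_names_spec : Claim_equal_build_stylemap_names := by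
  intro family_name style_name is_bold is_italic linked_style _
  unfold Spec_build_stylemap_names build_stylemap_names build_stylemap_names_alt
  simp only [pvLinked_eq]
  cases is_bold <;> cases is_italic <;> rfl
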